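-- pv_equiv track=rewrite | github.com/Divyateja04/gfg_sums | Difficulty: Medium/Maximum sum of elements not part of LIS/maximum-sum-of-elements-not-part-of-lis.py | nonLisMaxSum
-- ===== SOURCE A (Python) =====
-- def nonLisMaxSum(arr):
--     n = len(arr)
--
--     dp = [1] * n
--
--     for i in range(1,n):
--         for j in range(i):
--             if arr[i] > arr[j]:
--                 dp[i] = max(dp[i],dp[j]+1)
--
--     max_len = max(dp)
--
--     curr_len = max_len
--     LIS = []
--
--     for i in range(n-1,-1,-1):
--         if curr_len == dp[i]:
--             LIS.append(arr[i])
--             curr_len -= 1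
--
--     LIS = LIS[::-1]
--     return sum(arr) - sum(LIS)
-- ===== SOURCE B (Python) =====
-- def nonLisMaxSum(arr):
--     # Patience sorting: dp[i] = LIS length ending at i, via hand-rolled binary search on tails.
--     n = len(arr)
--     tails = []
--     dp = []
--     for x in arr:
--         lo, hi = 0, len(tails)
--         while lo < hi:
--             mid = (lo + hi) // 2
--             if tails[mid] < x:
--                 lo = mid + 1
--             else:
--                 hi = mid
--         if lo == len(tails):
--             tails.append(x)
--         else:
--             tails[lo] = x
--         dp.append(lo + 1)
--     curr = len(tails)
--     lis_sum = 0
--     for i in range(n - 1, -1, -1):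
--         if dp[i] == curr:
--             lis_sum += arr[i]
--             curr -= 1
--     return sum(arr) - lis_sum
-- ===== Notes on version B (the rewrite author's own statement) =====
-- stated objective: faster
-- what changed: Replaces the O(n^2) nested-loop LIS-length DP with patience sorting (hand-rolled binary search on a tails array) and accumulates the reconstructed LIS sum directly instead of building and reversing a list.
import Mathlib
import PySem

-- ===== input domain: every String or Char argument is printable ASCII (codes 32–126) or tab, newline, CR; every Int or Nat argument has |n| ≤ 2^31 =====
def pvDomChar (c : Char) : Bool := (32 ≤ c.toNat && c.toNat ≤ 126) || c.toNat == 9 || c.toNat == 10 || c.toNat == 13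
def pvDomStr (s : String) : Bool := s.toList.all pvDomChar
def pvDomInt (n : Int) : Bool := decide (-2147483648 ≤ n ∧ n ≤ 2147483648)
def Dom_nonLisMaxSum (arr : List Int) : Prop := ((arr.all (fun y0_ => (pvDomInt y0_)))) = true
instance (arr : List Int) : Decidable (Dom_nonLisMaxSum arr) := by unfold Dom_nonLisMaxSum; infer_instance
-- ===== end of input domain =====

-- B replaces the quadratic LIS-length DP by patience sorting (binary search on a tails
-- array) and accumulates the LIS sum directly: asymptotically faster (O(n log n) vs O(n^2)).

-- ===== PORT A =====
-- Literal port of A: nested-loop dp, max(dp), right-to-left greedy reconstruction into a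
-- list, then reverse and sum.  Python's max(dp) raises on empty dp (arr = []), which
-- Pre_nonLisMaxSum excludes; the `.getD 1` default is never reached inside Pre_.
def nonLisMaxSum (arr : List Int) : Int :=
  let n := arr.length
  let dp0 : List Int := List.replicate n 1
  let dp := ((List.range n).drop 1).foldl (fun dp i =>
      (List.range i).foldl (fun dp j =>
          if arr.getD j 0 < arr.getD i 0 then
            dp.set i (max (dp.getD i 0) (dp.getD j 0 + 1))
          else dp) dp) dp0
  let maxLen := (PySem.List.max? dp (fun y => y)).getD 1
  let lis := (((List.range n).reverse).foldl (fun (st : Int × List Int) i =>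
      if st.1 = dp.getD i 0 then (st.1 - 1, st.2 ++ [arr.getD i 0]) else st)
      (maxLen, ([] : List Int))).2
  arr.sum - lis.reverse.sum

-- ===== PORT B =====
-- Hand-rolled bisect_left of Source B: while lo < hi: mid = (lo+hi)//2; …   ((lo+hi)/2 on ℕ
-- equals Python's // here since both operands are nonnegative).
def bisectL (tails : List Int) (x : Int) (lo hi : Nat) : Nat :=
  if _h : lo < hi then
    let mid := (lo + hi) / 2
    if tails.getD mid 0 < x then bisectL tails x (mid + 1) hi
    else bisectL tails x lo mid
  else lo
termination_by hi - lo
decreasing_by all_goals omega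

-- body of Source B's main loop: binary-search position, update tails, record dp value
def bStep (st : List Int × List Int) (x : Int) : List Int × List Int :=
  let lo := bisectL st.1 x 0 st.1.length
  let tails' := if lo = st.1.length then st.1 ++ [x] else st.1.set lo x
  (tails', st.2 ++ [((lo : Int) + 1)])

def nonLisMaxSum_alt (arr : List Int) : Int :=
  let st := arr.foldl bStep (([] : List Int), ([] : List Int))
  let n := arr.length
  let r := ((List.range n).reverse).foldl (fun (st2 : Int × Int) i =>
      if st.2.getD i 0 = st2.1 then (st2.1 - 1, st2.2 + arr.getD i 0) else st2)
      (((st.1.length : Int)), (0 : Int))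
  arr.sum - r.2

-- ===== PRECONDITION & SPEC =====
-- Pre_ excludes exactly the empty list, on which Python A raises ValueError (max of empty).
def Pre_nonLisMaxSum (arr : List Int) : Prop := arr ≠ []
instance (arr : List Int) : Decidable (Pre_nonLisMaxSum arr) := by unfold Pre_nonLisMaxSum; infer_instance
def pvWitness_nonLisMaxSum : List Int := [3, 1, 2]

def Spec_nonLisMaxSum (arr : List Int) (out : Int) : Prop := out = nonLisMaxSum_alt arr
instance (arr : List Int) (out : Int) : Decidable (Spec_nonLisMaxSum arr out) := by unfold Spec_nonLisMaxSum; infer_instance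

-- ===== CLAIM (what is proved, stated in full; the proofs are below) =====
def Claim_equal_nonLisMaxSum : Prop := ∀ (arr : List Int), Dom_nonLisMaxSum arr → Pre_nonLisMaxSum arr → Spec_nonLisMaxSum arr (nonLisMaxSum arr)

-- ===== LEMMAS AND PROOFS =====

-- getD plumbing
theorem getD_append_lt (l l' : List Int) (i : ℕ) (h : i < l.length) :
    (l ++ l').getD i 0 = l.getD i 0 := List.getD_append _ _ _ _ h

theorem getD_append_ge (l l' : List Int) (i : ℕ) (h : l.length ≤ i) :
    (l ++ l').getD i 0 = l'.getD (i - l.length) 0 := by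
  simp [List.getD_eq_getElem?_getD, List.getElem?_append_right h]

theorem getD_set_self (l : List Int) (i : ℕ) (x : Int) (h : i < l.length) :
    (l.set i x).getD i 0 = x := by
  simp [List.getD_eq_getElem?_getD, List.getElem?_set_self h]

theorem getD_set_ne (l : List Int) (i j : ℕ) (x : Int) (h : i ≠ j) :
    (l.set i x).getD j 0 = l.getD j 0 := by
  simp [List.getD_eq_getElem?_getD, List.getElem?_set_ne h]

theorem getD_map_snd (l : List (Int × Int)) : ∀ (m : ℕ), m < l.length →
    (l.map Prod.snd).getD m 0 = (l.getD m (0,0)).2 := by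
  induction l with
  | nil => intro m hm; simp at hm
  | cons p t ih =>
    intro m hm
    cases m with
    | zero => rfl
    | succ m => simpa using ih m (by simpa using hm)

theorem getD_map_fst (l : List (Int × Int)) : ∀ (m : ℕ), m < l.length →
    (l.map Prod.fst).getD m 0 = (l.getD m (0,0)).1 := by
  induction l with
  | nil => intro m hm; simp at hm
  | cons p t ih =>
    intro m hm
    cases m with
    | zero => rfl
    | succ m => simpa using ih m (by simpa using hm)

theorem getD_take {α : Type} (l : List α) (i m : ℕ) (d : α) (h : m < i) :
    (l.take i).getD m d = l.getD m d := by
  simp [List.getD_eq_getElem?_getD, h]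

theorem take_succ_getD {α : Type} (l : List α) (k : ℕ) (d : α) (h : k < l.length) :
    l.take (k+1) = l.take k ++ [l.getD k d] := by
  rw [List.take_add_one, List.getElem?_eq_getElem h]
  simp [List.getD_eq_getElem?_getD, List.getElem?_eq_getElem h]

theorem set_append_cons {α : Type} (l : List α) (r : List α) (a v : α) :
    (l ++ a :: r).set l.length v = l ++ v :: r := by
  induction l with
  | nil => rfl
  | cons h t ih =>
    show h :: (t ++ a :: r).set t.length v = h :: (t ++ v :: r)
    rw [ih]

-- running-max folds
def nlF (x : Int) (m : Int) (p : Int × Int) : Int := if p.1 < x then max m p.2 else m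
def nlG (x : Int) (m : Int) (p : Int × Int) : Int := if p.1 < x then max m (p.2 + 1) else m
def nlMax (done : List (Int × Int)) (x : Int) : Int := done.foldl (nlF x) 0

theorem nlF_init_le (x : Int) : ∀ (l : List (Int × Int)) (init : Int), init ≤ l.foldl (nlF x) init := by
  intro l
  induction l with
  | nil => intro init; simp
  | cons p t ih =>
    intro init
    refine le_trans ?_ (ih (nlF x init p))
    unfold nlF; split
    · exact le_max_left _ _
    · exact le_rfl

theorem nlF_mem_le (x : Int) : ∀ (l : List (Int × Int)) (init : Int) (p : Int × Int),
    p ∈ l → p.1 < x → p.2 ≤ l.foldl (nlF x) init := by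
  intro l
  induction l with
  | nil => intro init p hp; exact absurd hp (List.not_mem_nil)
  | cons q t ih =>
    intro init p hp hpx
    rcases List.mem_cons.mp hp with h | h
    · subst h
      simp only [List.foldl_cons]
      refine le_trans ?_ (nlF_init_le x t (nlF x init p))
      unfold nlF; rw [if_pos hpx]; exact le_max_right _ _
    · simp only [List.foldl_cons]; exact ih _ p h hpx

theorem nlF_bound (x b : Int) : ∀ (l : List (Int × Int)) (init : Int), init ≤ b →
    (∀ p ∈ l, p.1 < x → p.2 ≤ b) → l.foldl (nlF x) init ≤ b := by
  intro l
  induction l with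
  | nil => intro init h _; simpa using h
  | cons q t ih =>
    intro init h hall
    simp only [List.foldl_cons]
    refine ih _ ?_ (fun p hp hpx => hall p (List.mem_cons_of_mem _ hp) hpx)
    unfold nlF; split
    · exact max_le h (hall q (List.mem_cons_self) (by assumption))
    · exact h

theorem nlG_shift (x : Int) : ∀ (l : List (Int × Int)) (m : Int),
    l.foldl (nlG x) (m + 1) = l.foldl (nlF x) m + 1 := by
  intro l
  induction l with
  | nil => intro m; rfl
  | cons q t ih =>
    intro m
    simp only [List.foldl_cons]
    have h : nlG x (m + 1) q = nlF x m q + 1 := by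
      unfold nlF nlG; split
      · exact max_add_add_right m q.2 1
      · rfl
    rw [h, ih]

-- (value, LIS-length-ending-here) pairs: the functional spec both ports are reduced to
def pairsStep (done : List (Int × Int)) (x : Int) : List (Int × Int) :=
  done ++ [(x, nlMax done x + 1)]

def pairsOf (arr : List Int) : List (Int × Int) := arr.foldl pairsStep []

theorem pairs_len : ∀ (ys : List Int) (done : List (Int × Int)),
    (ys.foldl pairsStep done).length = done.length + ys.length := by
  intro ys
  induction ys with
  | nil => intro done; simp
  | cons y t ih =>
    intro done
    simp only [List.foldl_cons]
    rw [ih]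
    simp [pairsStep]
    omega

theorem pairs_fst : ∀ (ys : List Int) (done : List (Int × Int)),
    (ys.foldl pairsStep done).map Prod.fst = done.map Prod.fst ++ ys := by
  intro ys
  induction ys with
  | nil => intro done; simp
  | cons y t ih =>
    intro done
    simp only [List.foldl_cons]
    rw [ih]
    simp [pairsStep]

-- strict sortedness via getD
def SortedLT (t : List Int) : Prop :=
  ∀ i j, i < j → j < t.length → t.getD i 0 < t.getD j 0

-- patience invariant: tails is sorted, lengths are bounded by |tails|, and
-- tails[k] is the minimum value among pairs of length k+1 (and is attained)
def PatInv (done : List (Int × Int)) (t : List Int) : Prop :=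
  SortedLT t ∧
  (∀ p ∈ done, 1 ≤ p.2 ∧ p.2 ≤ (t.length : Int)) ∧
  (∀ k, k < t.length →
    (∃ p ∈ done, p.2 = (k : Int) + 1 ∧ p.1 = t.getD k 0) ∧
    (∀ p ∈ done, p.2 = (k : Int) + 1 → t.getD k 0 ≤ p.1))

theorem patinv_nil : PatInv [] [] := by
  refine ⟨?_, ?_, ?_⟩
  · intro i j _ hj; simp at hj
  · intro p hp; simp at hp
  · intro k hk; simp at hk

theorem bisectL_spec (t : List Int) (x : Int) (hs : SortedLT t) :
    ∀ d lo hi, hi - lo ≤ d → lo ≤ hi → hi ≤ t.length →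
    (∀ i, i < lo → t.getD i 0 < x) → (∀ i, hi ≤ i → i < t.length → x ≤ t.getD i 0) →
    (bisectL t x lo hi ≤ t.length ∧ (∀ i, i < bisectL t x lo hi → t.getD i 0 < x) ∧
     (∀ i, bisectL t x lo hi ≤ i → i < t.length → x ≤ t.getD i 0)) := by
  intro d
  induction d with
  | zero =>
    intro lo hi hd hlh hhl h1 h2
    rw [bisectL, dif_neg (by omega)]
    exact ⟨by omega, h1, fun i hge hlt => h2 i (by omega) hlt⟩
  | succ d ihd =>
    intro lo hi hd hlh hhl h1 h2
    by_cases hlt : lo < hi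
    · have key : bisectL t x lo hi =
          if t.getD ((lo + hi) / 2) 0 < x then bisectL t x ((lo + hi) / 2 + 1) hi
          else bisectL t x lo ((lo + hi) / 2) := by
        conv_lhs => rw [bisectL]
        simp only [dif_pos hlt]
      rw [key]
      by_cases hc : t.getD ((lo + hi) / 2) 0 < x
      · rw [if_pos hc]
        refine ihd ((lo + hi) / 2 + 1) hi (by omega) (by omega) hhl ?_ h2
        intro i hi1
        have hmlen : (lo + hi) / 2 < t.length := by omega
        rcases Nat.lt_succ_iff_lt_or_eq.mp hi1 with h' | h'
        · exact lt_trans (hs i _ h' hmlen) hc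
        · subst h'; exact hc
      · rw [if_neg hc]
        refine ihd lo ((lo + hi) / 2) (by omega) (by omega) (by omega) h1 ?_
        intro i hge hlen
        have hxm : x ≤ t.getD ((lo + hi) / 2) 0 := not_lt.mp hc
        rcases eq_or_lt_of_le hge with h' | h'
        · rw [← h']; exact hxm
        · exact le_trans hxm (le_of_lt (hs _ i h' hlen))
    · rw [bisectL, dif_neg hlt]
      exact ⟨by omega, fun i hi1 => h1 i hi1, fun i hge hlen => h2 i (by omega) hlen⟩

theorem inv_step (done : List (Int × Int)) (t : List Int) (x : Int) (h : PatInv done t) :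
    nlMax done x = ((bisectL t x 0 t.length : ℕ) : Int) ∧
    PatInv (pairsStep done x)
      (if bisectL t x 0 t.length = t.length then t ++ [x] else t.set (bisectL t x 0 t.length) x) := by
  obtain ⟨hs, hb, hcls⟩ := h
  obtain ⟨hrle, hlt, hge⟩ := bisectL_spec t x hs t.length 0 t.length (by omega) (by omega) le_rfl
    (by intro i hi; omega) (by intro i h1 h2; omega)
  have hmax : nlMax done x = ((bisectL t x 0 t.length : ℕ) : Int) := by
    have hle : nlMax done x ≤ ((bisectL t x 0 t.length : ℕ) : Int) := by
      refine nlF_bound x _ done 0 (by positivity) ?_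
      intro p hp hpx
      by_contra hgt
      obtain ⟨hp1, hp2⟩ := hb p hp
      have hkk : ((p.2 - 1).toNat : Int) = p.2 - 1 := by omega
      have hklen : (p.2 - 1).toNat < t.length := by omega
      have hkr : bisectL t x 0 t.length ≤ (p.2 - 1).toNat := by omega
      have hmin := (hcls (p.2 - 1).toNat hklen).2 p hp (by omega)
      have hx := hge (p.2 - 1).toNat hkr hklen
      omega
    have hge' : ((bisectL t x 0 t.length : ℕ) : Int) ≤ nlMax done x := by
      rcases Nat.eq_zero_or_pos (bisectL t x 0 t.length) with h0 | hpos
      · rw [h0]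
        exact_mod_cast nlF_init_le x done 0
      · obtain ⟨⟨p, hp, hp2, hp1⟩, _⟩ := hcls (bisectL t x 0 t.length - 1) (by omega)
        have hpx : p.1 < x := by rw [hp1]; exact hlt _ (by omega)
        have hmem := nlF_mem_le x done 0 p hp hpx
        have : nlMax done x = done.foldl (nlF x) 0 := rfl
        omega
    omega
  refine ⟨hmax, ?_⟩
  by_cases hcase : bisectL t x 0 t.length = t.length
  · rw [if_pos hcase]
    have hlen' : (t ++ [x]).length = t.length + 1 := by simp
    have hgetlt : ∀ i, i < t.length → (t ++ [x]).getD i 0 = t.getD i 0 :=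
      fun i hi => getD_append_lt _ _ _ hi
    have hgetlast : (t ++ [x]).getD t.length 0 = x := by
      rw [getD_append_ge _ _ _ le_rfl]; simp
    refine ⟨?_, ?_, ?_⟩
    · intro i j hij hj
      rw [hlen'] at hj
      rcases Nat.lt_or_ge j t.length with hjl | hjl
      · rw [hgetlt i (by omega), hgetlt j hjl]; exact hs i j hij hjl
      · have hjeq : j = t.length := by omega
        rw [hjeq, hgetlast, hgetlt i (by omega)]
        exact hlt i (by omega)
    · intro p hp
      simp only [pairsStep, List.mem_append, List.mem_singleton] at hp
      rcases hp with hp | hp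
      · obtain ⟨h1, h2⟩ := hb p hp
        refine ⟨h1, ?_⟩
        rw [hlen']; push_cast; omega
      · subst hp
        simp only
        rw [hmax, hlen', hcase]
        constructor
        · omega
        · push_cast; omega
    · intro k hk
      rw [hlen'] at hk
      rcases Nat.lt_or_ge k t.length with hkl | hkl
      · constructor
        · obtain ⟨⟨p, hp, e2, e1⟩, _⟩ := hcls k hkl
          exact ⟨p, by simp only [pairsStep, List.mem_append, List.mem_singleton]; exact Or.inl hp,
            e2, by rw [hgetlt k hkl]; exact e1⟩
        · intro p hp he
          simp only [pairsStep, List.mem_append, List.mem_singleton] at hp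
          rcases hp with hp | hp
          · rw [hgetlt k hkl]; exact (hcls k hkl).2 p hp he
          · exfalso
            subst hp
            simp only at he
            rw [hmax, hcase] at he
            omega
      · have hkeq : k = t.length := by omega
        subst hkeq
        constructor
        · refine ⟨(x, nlMax done x + 1),
            by simp [pairsStep], ?_, ?_⟩
          · simp only
            rw [hmax, hcase]
          · simp only [hgetlast]
        · intro p hp he
          simp only [pairsStep, List.mem_append, List.mem_singleton] at hp
          rcases hp with hp | hp
          · exfalso
            obtain ⟨_, h2⟩ := hb p hp
            omega
          · subst hp
            rw [hgetlast]
  · rw [if_neg hcase]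
    have hrlt : bisectL t x 0 t.length < t.length := lt_of_le_of_ne hrle hcase
    have hxle : x ≤ t.getD (bisectL t x 0 t.length) 0 := hge _ le_rfl hrlt
    have hlen' : (t.set (bisectL t x 0 t.length) x).length = t.length := List.length_set
    have hgself : (t.set (bisectL t x 0 t.length) x).getD (bisectL t x 0 t.length) 0 = x :=
      getD_set_self _ _ _ hrlt
    have hgne : ∀ j, j ≠ bisectL t x 0 t.length →
        (t.set (bisectL t x 0 t.length) x).getD j 0 = t.getD j 0 :=
      fun j hj => getD_set_ne t _ j x (Ne.symm hj)
    refine ⟨?_, ?_, ?_⟩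
    · intro i j hij hj
      rw [hlen'] at hj
      by_cases hjr : j = bisectL t x 0 t.length
      · subst hjr
        rw [hgself, hgne i (by omega)]
        exact hlt i hij
      · by_cases hir : i = bisectL t x 0 t.length
        · subst hir
          rw [hgself, hgne j hjr]
          exact lt_of_le_of_lt hxle (hs _ j hij hj)
        · rw [hgne i hir, hgne j hjr]; exact hs i j hij hj
    · intro p hp
      simp only [pairsStep, List.mem_append, List.mem_singleton] at hp
      rcases hp with hp | hp
      · obtain ⟨h1, h2⟩ := hb p hp
        exact ⟨h1, by rw [hlen']; exact h2⟩
      · subst hp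
        simp only
        rw [hmax, hlen']
        constructor
        · omega
        · omega
    · intro k hk
      rw [hlen'] at hk
      by_cases hkr : k = bisectL t x 0 t.length
      · subst hkr
        constructor
        · refine ⟨(x, nlMax done x + 1),
            by simp [pairsStep], ?_, ?_⟩
          · simp only
            rw [hmax]
          · rw [hgself]
        · intro p hp he
          simp only [pairsStep, List.mem_append, List.mem_singleton] at hp
          rcases hp with hp | hp
          · rw [hgself]
            exact le_trans hxle ((hcls _ hrlt).2 p hp he)
          · subst hp
            rw [hgself]
      · constructor
        · obtain ⟨⟨p, hp, e2, e1⟩, _⟩ := hcls k hk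
          exact ⟨p, by simp only [pairsStep, List.mem_append, List.mem_singleton]; exact Or.inl hp,
            e2, by rw [hgne k hkr]; exact e1⟩
        · intro p hp he
          simp only [pairsStep, List.mem_append, List.mem_singleton] at hp
          rcases hp with hp | hp
          · rw [hgne k hkr]; exact (hcls k hk).2 p hp he
          · exfalso
            subst hp
            simp only at he
            rw [hmax] at he
            omega

theorem b_fold : ∀ (xs : List Int) (done : List (Int × Int)) (t : List Int), PatInv done t →
    PatInv (xs.foldl pairsStep done) ((xs.foldl bStep (t, done.map Prod.snd)).1) ∧
    (xs.foldl bStep (t, done.map Prod.snd)).2 = (xs.foldl pairsStep done).map Prod.snd := by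
  intro xs
  induction xs with
  | nil => intro done t h; exact ⟨h, rfl⟩
  | cons y ys ih =>
    intro done t h
    obtain ⟨hm, hinv⟩ := inv_step done t y h
    have hstep : bStep (t, done.map Prod.snd) y =
        ((if bisectL t y 0 t.length = t.length then t ++ [y] else t.set (bisectL t y 0 t.length) y),
         (pairsStep done y).map Prod.snd) := by
      simp [bStep, pairsStep, ← hm]
    simp only [List.foldl_cons, hstep]
    exact ih (pairsStep done y) _ hinv

theorem dp_max (P : List (Int × Int)) (T : List Int) (hinv : PatInv P T) (hne : P ≠ []) :
    PySem.List.max? (P.map Prod.snd) (fun y => y) = some ((T.length : Int)) := by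
  obtain ⟨_, hb, hcls⟩ := hinv
  have hlen1 : 1 ≤ T.length := by
    obtain ⟨p, hp⟩ : ∃ p, p ∈ P := by
      cases P with
      | nil => exact absurd rfl hne
      | cons q t => exact ⟨q, List.mem_cons_self⟩
    obtain ⟨h1, h2⟩ := hb p hp
    omega
  obtain ⟨⟨q, hq, hq2, _⟩, _⟩ := hcls (T.length - 1) (by omega)
  have hq2' : q.2 = (T.length : Int) := by omega
  cases hm : PySem.List.max? (P.map Prod.snd) (fun y => y) with
  | none =>
    rw [PySem.List.max?_eq_none_iff] at hm
    exact absurd (List.map_eq_nil_iff.mp hm) hne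
  | some m =>
    have hmem := PySem.List.max?_mem hm
    obtain ⟨p, hp, hpm⟩ := List.mem_map.mp hmem
    have h1 : m ≤ (T.length : Int) := by rw [← hpm]; exact (hb p hp).2
    have h2 : (T.length : Int) ≤ m := by
      have hub := PySem.List.max?_isMax hm q.2 (List.mem_map.mpr ⟨q, hq, rfl⟩)
      simp only at hub
      omega
    have : m = (T.length : Int) := le_antisymm h1 h2
    rw [this]

theorem inner_fold (arr : List Int) (done : List (Int × Int)) (rest : List Int) (i : ℕ)
    (hi : done.length = i)
    (hfst : ∀ m, m < i → (done.getD m (0,0)).1 = arr.getD m 0) :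
    ∀ k, k ≤ i → ∀ c : Int,
    (List.range k).foldl (fun dp j =>
        if arr.getD j 0 < arr.getD i 0 then
          dp.set i (max (dp.getD i 0) (dp.getD j 0 + 1))
        else dp) (done.map Prod.snd ++ c :: rest)
    = done.map Prod.snd ++ ((done.take k).foldl (nlG (arr.getD i 0)) c) :: rest := by
  intro k
  induction k with
  | zero => intro _ c; simp
  | succ k ihk =>
    intro hk c
    have hkd : k < done.length := by omega
    have hLlen : (done.map Prod.snd).length = i := by simp [hi]
    rw [List.range_succ, List.foldl_append, ihk (by omega)]
    simp only [List.foldl_cons, List.foldl_nil]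
    have hacc : arr.getD k 0 = (done.getD k (0,0)).1 := (hfst k (by omega)).symm
    have hget_i : (done.map Prod.snd ++ ((done.take k).foldl (nlG (arr.getD i 0)) c) :: rest).getD i 0
        = (done.take k).foldl (nlG (arr.getD i 0)) c := by
      rw [getD_append_ge _ _ _ (by omega), hLlen]
      simp
    have hget_k : (done.map Prod.snd ++ ((done.take k).foldl (nlG (arr.getD i 0)) c) :: rest).getD k 0
        = (done.getD k (0,0)).2 := by
      rw [getD_append_lt _ _ _ (by omega)]
      exact getD_map_snd done k hkd
    have hset : ∀ v, (done.map Prod.snd ++ ((done.take k).foldl (nlG (arr.getD i 0)) c) :: rest).set i v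
        = done.map Prod.snd ++ v :: rest := by
      intro v
      have h := set_append_cons (done.map Prod.snd) rest ((done.take k).foldl (nlG (arr.getD i 0)) c) v
      rw [hLlen] at h
      exact h
    rw [take_succ_getD done k (0,0) hkd, List.foldl_append]
    simp only [List.foldl_cons, List.foldl_nil]
    rw [hacc]
    by_cases hc : (done.getD k (0,0)).1 < arr.getD i 0
    · rw [if_pos hc, hget_i, hget_k, hset]
      simp only [nlG]
      rw [if_pos hc]
    · rw [if_neg hc]
      simp only [nlG]
      rw [if_neg hc]

theorem outer_fold (arr : List Int) :
    ∀ k, k + 1 ≤ arr.length →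
    (List.range' 1 k).foldl (fun dp i =>
        (List.range i).foldl (fun dp j =>
            if arr.getD j 0 < arr.getD i 0 then
              dp.set i (max (dp.getD i 0) (dp.getD j 0 + 1))
            else dp) dp) (List.replicate arr.length 1)
    = (pairsOf (arr.take (k+1))).map Prod.snd ++ List.replicate (arr.length - (k+1)) (1:Int) := by
  intro k
  induction k with
  | zero =>
    intro h1
    cases arr with
    | nil => simp at h1
    | cons a tl =>
      simp [pairsOf, pairsStep, nlMax, List.replicate_succ]
  | succ k ih =>
    intro hk1
    have e1 : (1:ℕ) + 1 * k = k + 1 := by omega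
    rw [List.range'_concat, List.foldl_append, ih (by omega), e1]
    simp only [List.foldl_cons, List.foldl_nil]
    have hrep : List.replicate (arr.length - (k+1)) (1:Int)
        = (1:Int) :: List.replicate (arr.length - (k+2)) 1 := by
      rw [show arr.length - (k+1) = (arr.length - (k+2)) + 1 from by omega, List.replicate_succ]
    rw [hrep]
    have hdl : (pairsOf (arr.take (k+1))).length = k + 1 := by
      unfold pairsOf
      rw [pairs_len]
      simp [List.length_take]
      omega
    have hfst : ∀ m, m < k+1 → ((pairsOf (arr.take (k+1))).getD m (0,0)).1 = arr.getD m 0 := by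
      intro m hm
      have h1 : ((pairsOf (arr.take (k+1))).map Prod.fst).getD m 0
          = ((pairsOf (arr.take (k+1))).getD m (0,0)).1 := getD_map_fst _ m (by omega)
      have h2 : (pairsOf (arr.take (k+1))).map Prod.fst = arr.take (k+1) := by
        unfold pairsOf
        rw [pairs_fst]
        simp
      rw [← h1, h2]
      exact getD_take arr (k+1) m 0 hm
    have hif := inner_fold arr (pairsOf (arr.take (k+1))) (List.replicate (arr.length - (k+2)) 1)
      (k+1) hdl hfst (k+1) le_rfl 1
    have htk : (pairsOf (arr.take (k+1))).take (k+1) = pairsOf (arr.take (k+1)) := by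
      exact List.take_of_length_le hdl.le
    rw [htk] at hif
    rw [hif]
    have htake2 : arr.take (k+2) = arr.take (k+1) ++ [arr.getD (k+1) 0] :=
      take_succ_getD arr (k+1) 0 (by omega)
    have hpairs2 : pairsOf (arr.take (k+2)) = pairsStep (pairsOf (arr.take (k+1))) (arr.getD (k+1) 0) := by
      rw [htake2]
      unfold pairsOf
      rw [List.foldl_append]
      simp only [List.foldl_cons, List.foldl_nil]
    rw [hpairs2]
    simp only [pairsStep, List.map_append, List.map_cons, List.map_nil]
    have hshift : (pairsOf (arr.take (k+1))).foldl (nlG (arr.getD (k+1) 0)) 1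
        = nlMax (pairsOf (arr.take (k+1))) (arr.getD (k+1) 0) + 1 := by
      have h := nlG_shift (arr.getD (k+1) 0) (pairsOf (arr.take (k+1))) 0
      simpa [nlMax] using h
    rw [hshift]
    simp

theorem recon_fold (arr dp : List Int) :
    ∀ (idx : List ℕ) (curr : Int) (lis : List Int) (s : Int), s = lis.sum →
    (idx.foldl (fun (st2 : Int × Int) i =>
        if dp.getD i 0 = st2.1 then (st2.1 - 1, st2.2 + arr.getD i 0) else st2) (curr, s)).1
      = (idx.foldl (fun (st : Int × List Int) i =>
        if st.1 = dp.getD i 0 then (st.1 - 1, st.2 ++ [arr.getD i 0]) else st) (curr, lis)).1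
    ∧ (idx.foldl (fun (st2 : Int × Int) i =>
        if dp.getD i 0 = st2.1 then (st2.1 - 1, st2.2 + arr.getD i 0) else st2) (curr, s)).2
      = ((idx.foldl (fun (st : Int × List Int) i =>
        if st.1 = dp.getD i 0 then (st.1 - 1, st.2 ++ [arr.getD i 0]) else st) (curr, lis)).2).sum := by
  intro idx
  induction idx with
  | nil => intro curr lis s hs; exact ⟨rfl, hs⟩
  | cons i rest ih =>
    intro curr lis s hs
    simp only [List.foldl_cons]
    by_cases hc : dp.getD i 0 = curr
    · rw [if_pos hc, if_pos hc.symm]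
      exact ih _ _ _ (by simp [hs])
    · rw [if_neg hc, if_neg (fun h => hc h.symm)]
      exact ih _ _ _ hs

-- ===== VERDICT (by name: the statement is the Claim_ definition above) =====
theorem nonLisMaxSum_spec : Claim_equal_nonLisMaxSum := by
  intro arr _ hpre
  unfold Spec_nonLisMaxSum
  have hn : arr.length ≠ 0 := fun h => hpre (List.eq_nil_of_length_eq_zero h)
  -- B side: the patience loop computes the same dp sequence
  have hB := b_fold arr [] [] patinv_nil
  simp only [List.map_nil] at hB
  have hP : arr.foldl pairsStep [] = pairsOf arr := rfl
  rw [hP] at hB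
  obtain ⟨hinv, hdp⟩ := hB
  have hPne : pairsOf arr ≠ [] := by
    intro h
    have := pairs_len arr []
    rw [hP, h] at this
    simp at this
    omega
  have hmax := dp_max (pairsOf arr) ((arr.foldl bStep ([], [])).1) hinv hPne
  -- A side: the nested-loop dp equals the same sequence
  have hdrop : (List.range arr.length).drop 1 = List.range' 1 (arr.length - 1) := by
    rw [List.range_eq_range', show arr.length = (arr.length - 1) + 1 from by omega, List.range'_succ]
    simp
  have houter := outer_fold arr (arr.length - 1) (by omega)
  rw [show arr.length - 1 + 1 = arr.length from by omega] at houter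
  rw [List.take_length] at houter
  rw [show arr.length - arr.length = 0 from by omega] at houter
  simp only [List.replicate_zero, List.append_nil] at houter
  -- assemble
  simp only [nonLisMaxSum, nonLisMaxSum_alt]
  rw [hdrop, houter, hdp, hmax]
  simp only [Option.getD_some]
  obtain ⟨h1, h2⟩ := recon_fold arr ((pairsOf arr).map Prod.snd) ((List.range arr.length).reverse)
    (((arr.foldl bStep ([], [])).1.length : Int)) [] 0 rfl
  rw [List.sum_reverse, h2]
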